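-- pv_equiv track=rewrite | github.com/mapea1606/python-basic-programs | cuestpractico_modulo5.py | reemplazo
-- ===== SOURCE A (Python) =====
-- def reemplazo(string):
--     mayuscula = "ABCDEFGHIJKLMNOPQRSTUVWXYZ"
--     i = 0
--     while i < len(string):
--         j = 0
--         while j < len(mayuscula):
--             if string[i] == mayuscula[j]:
--                 string = string.replace(string[i],"$")
--             j = j + 1
--         i = i + 1
--     return string
-- ===== SOURCE B (Python) =====
-- def reemplazo(string):
--     return "".join('$' if 'A' <= c <= 'Z' else c for c in string)
-- ===== Notes on version B (the rewrite author's own statement) =====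
-- stated objective: faster
-- what changed: Replaces A's nested while loops (26 comparisons per position plus a full-string replace rescan on every hit) with a single left-to-right pass that maps each character to '$' when it lies in 'A'..'Z'.
import Mathlib
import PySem

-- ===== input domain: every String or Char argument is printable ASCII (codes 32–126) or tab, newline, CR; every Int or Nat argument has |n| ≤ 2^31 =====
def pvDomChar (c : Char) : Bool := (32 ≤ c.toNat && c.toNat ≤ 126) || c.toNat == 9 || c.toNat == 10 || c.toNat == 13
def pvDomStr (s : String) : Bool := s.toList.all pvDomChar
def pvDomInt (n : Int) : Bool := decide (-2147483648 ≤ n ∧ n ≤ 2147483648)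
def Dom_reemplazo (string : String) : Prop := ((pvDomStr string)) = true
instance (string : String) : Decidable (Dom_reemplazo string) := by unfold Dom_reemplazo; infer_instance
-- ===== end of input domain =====

-- B replaces A's nested while loops with repeated string.replace rescans by a single
-- left-to-right pass mapping each character to '$' when 'A' ≤ c ≤ 'Z'.

-- ===== PORT A =====

-- mayuscula = "ABCDEFGHIJKLMNOPQRSTUVWXYZ"
def pvMay : List Char := "ABCDEFGHIJKLMNOPQRSTUVWXYZ".toList

-- inner while loop over j; string[i] / mayuscula[j] are PySem.List.pyGet? (the
-- `none` match arms are unreachable: both indices are always in range in A)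
def pvInnerA (s : List Char) (i : Nat) (j : Nat) : List Char :=
  if j < pvMay.length then
    let s' :=
      match PySem.List.pyGet? s (i : Int), PySem.List.pyGet? pvMay (j : Int) with
      | some a, some b => if a = b then PySem.Chars.replace s [a] ['$'] else s
      | _, _ => s
    pvInnerA s' i (j + 1)
  else s
termination_by pvMay.length - j

-- outer while loop over i; fuel (= the initial length, enough iterations since the
-- loop advances i by 1 each pass and the length never changes) only makes the same
-- computation total — the guard i < len(current string) is Python's loop condition
def pvOuterA (fuel : Nat) (s : List Char) (i : Nat) : List Char :=
  match fuel with
  | 0 => s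
  | fuel + 1 => if i < s.length then pvOuterA fuel (pvInnerA s i 0) (i + 1) else s

def reemplazo (string : String) : String :=
  String.ofList (pvOuterA string.toList.length string.toList 0)

-- ===== PORT B =====
-- one pass: '$' if 'A' <= c <= 'Z' else c, for each character; the join of the
-- resulting one-character strings is exactly the string of the mapped characters
def reemplazo_alt (string : String) : String :=
  String.ofList (string.toList.map (fun c => if 'A' ≤ c ∧ c ≤ 'Z' then '$' else c))

-- ===== PRECONDITION & SPEC =====
def Spec_reemplazo (string : String) (out : String) : Prop := out = reemplazo_alt string
instance (string : String) (out : String) : Decidable (Spec_reemplazo string out) := by unfold Spec_reemplazo; infer_instance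

-- ===== CLAIM (what is proved, stated in full; the proofs are below) =====
def Claim_equal_reemplazo : Prop := ∀ (string : String), Dom_reemplazo string → Spec_reemplazo string (reemplazo string)

-- ===== LEMMAS AND PROOFS =====

lemma pv_go_single (a b : Char) : ∀ (fuel : Nat) (s acc : List Char), s.length ≤ fuel →
    PySem.Chars.replace.go [a] [b] fuel s acc
      = acc.reverse ++ s.map (fun c => if c = a then b else c) := by
  intro fuel
  induction fuel with
  | zero =>
    intro s acc h
    have : s = [] := List.eq_nil_of_length_eq_zero (Nat.le_zero.mp h)
    subst this; simp [PySem.Chars.replace.go]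
  | succ n ih =>
    intro s acc h
    cases s with
    | nil => simp [PySem.Chars.replace.go]
    | cons c t =>
      rw [PySem.Chars.replace.go]
      by_cases hac : a = c
      · subst hac
        simp only [List.isPrefixOf, BEq.rfl, Bool.true_and, if_true]
        rw [show List.drop [a].length (a :: t) = t from rfl,
          show [b].reverse ++ acc = b :: acc from rfl,
          ih t (b :: acc) (by simpa using h)]
        simp
      · have : List.isPrefixOf [a] (c :: t) = false := by
          simp [List.isPrefixOf, hac]
        simp only [this, Bool.false_eq_true, if_false]
        rw [ih t (c :: acc) (by simpa using h)]
        simp [eq_comm, hac]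

lemma pv_replace_single (s : List Char) (a b : Char) :
    PySem.Chars.replace s [a] [b] = s.map (fun c => if c = a then b else c) := by
  rw [PySem.Chars.replace]
  simp only [List.isEmpty_cons, Bool.false_eq_true, if_false]
  simpa using pv_go_single a b s.length s [] le_rfl

lemma pv_char_eq_iff (c d : Char) : c = d ↔ c.toNat = d.toNat := by
  constructor
  · intro h; rw [h]
  · intro h; cases c; cases d; simp only [Char.toNat] at h; simp_all [UInt32.toNat_inj]

lemma pv_mem_may_iff (c : Char) : c ∈ pvMay ↔ (65 ≤ c.toNat ∧ c.toNat ≤ 90) := by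
  have e : pvMay = ['A','B','C','D','E','F','G','H','I','J','K','L','M','N','O','P','Q','R','S','T','U','V','W','X','Y','Z'] := by decide
  rw [e]
  simp only [List.mem_cons, List.not_mem_nil, or_false, pv_char_eq_iff]
  simp only [show ('A').toNat = 65 from rfl, show ('B').toNat = 66 from rfl, show ('C').toNat = 67 from rfl, show ('D').toNat = 68 from rfl, show ('E').toNat = 69 from rfl, show ('F').toNat = 70 from rfl, show ('G').toNat = 71 from rfl, show ('H').toNat = 72 from rfl, show ('I').toNat = 73 from rfl, show ('J').toNat = 74 from rfl, show ('K').toNat = 75 from rfl, show ('L').toNat = 76 from rfl, show ('M').toNat = 77 from rfl, show ('N').toNat = 78 from rfl, show ('O').toNat = 79 from rfl, show ('P').toNat = 80 from rfl, show ('Q').toNat = 81 from rfl, show ('R').toNat = 82 from rfl, show ('S').toNat = 83 from rfl, show ('T').toNat = 84 from rfl, show ('U').toNat = 85 from rfl, show ('V').toNat = 86 from rfl, show ('W').toNat = 87 from rfl, show ('X').toNat = 88 from rfl, show ('Y').toNat = 89 from rfl, show ('Z').toNat = 90 from rfl]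
  omega

-- what every uppercase letter becomes, phrased through membership in pvMay
def pvMapF (c : Char) : Char := if c ∈ pvMay then '$' else c

lemma pv_dollar_not_may : ('$' : Char) ∉ pvMay := by decide

lemma pv_inner_spec : ∀ (k j : Nat) (s : List Char) (i : Nat) (a : Char),
    pvMay.length - j = k →
    PySem.List.pyGet? s (i : Int) = some a →
    pvInnerA s i j = if a ∈ pvMay.drop j then s.map (fun c => if c = a then '$' else c) else s := by
  intro k
  induction k with
  | zero =>
    intro j s i a hk ha
    have hj : ¬ j < pvMay.length := by omega
    rw [pvInnerA, if_neg hj, List.drop_eq_nil_of_le (by omega)]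
    simp
  | succ n ih =>
    intro j s i a hk ha
    have hj : j < pvMay.length := by omega
    have hmj : PySem.List.pyGet? pvMay (j : Int) = some pvMay[j] := by
      rw [PySem.List.pyGet?_natCast]
      exact List.getElem?_eq_getElem hj
    have hdrop : pvMay.drop j = pvMay[j] :: pvMay.drop (j + 1) :=
      List.drop_eq_getElem_cons hj
    rw [pvInnerA, if_pos hj]
    simp only [ha, hmj]
    by_cases hab : a = pvMay[j]
    · rw [if_pos hab, pv_replace_single]
      have ha' : PySem.List.pyGet? (s.map (fun c => if c = a then '$' else c)) (i : Int)
          = some '$' := by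
        rw [PySem.List.pyGet?_natCast] at ha ⊢
        simp [List.getElem?_map, ha]
      rw [ih (j + 1) _ i '$' (by omega) ha']
      have hnot : ('$' : Char) ∉ pvMay.drop (j + 1) := fun h =>
        pv_dollar_not_may (List.mem_of_mem_drop h)
      rw [if_neg hnot, hdrop, if_pos (by rw [hab]; exact List.mem_cons_self)]
    · have hiff : (a ∈ List.drop j pvMay) ↔ (a ∈ List.drop (j + 1) pvMay) := by
        rw [hdrop, List.mem_cons]
        exact ⟨fun h => h.resolve_left hab, Or.inr⟩
      rw [if_neg hab, ih (j + 1) s i a (by omega) ha]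
      simp only [hiff]

lemma pv_mapF_comp (a : Char) (ha : a ∈ pvMay) (c : Char) :
    pvMapF (if c = a then '$' else c) = pvMapF c := by
  by_cases h : c = a
  · subst h; simp [pvMapF, pv_dollar_not_may, ha]
  · rw [if_neg h]

lemma pv_outer_spec : ∀ (fuel i : Nat) (s : List Char),
    s.length - i ≤ fuel →
    (∀ c ∈ s.take i, c ∉ pvMay) →
    pvOuterA fuel s i = s.take i ++ (s.drop i).map pvMapF := by
  intro fuel
  induction fuel with
  | zero =>
    intro i s hk hinv
    rw [pvOuterA, List.drop_eq_nil_of_le (by omega),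
      List.take_of_length_le (by omega)]
    simp
  | succ n ih =>
    intro i s hk hinv
    rw [pvOuterA]
    by_cases hi : i < s.length
    case neg =>
      rw [if_neg hi, List.drop_eq_nil_of_le (by omega),
        List.take_of_length_le (by omega)]
      simp
    case pos =>
    have ha : PySem.List.pyGet? s (i : Int) = some s[i] := by
      rw [PySem.List.pyGet?_natCast]
      exact List.getElem?_eq_getElem hi
    have htake : s.take (i + 1) = s.take i ++ [s[i]] := by
      rw [List.take_add_one, List.getElem?_eq_getElem hi]; rfl
    have hdrop : s.drop i = s[i] :: s.drop (i + 1) := List.drop_eq_getElem_cons hi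
    rw [if_pos hi, pv_inner_spec (pvMay.length - 0) 0 s i s[i] rfl ha, List.drop_zero]
    by_cases hup : s[i] ∈ pvMay
    · rw [if_pos hup]
      set f : Char → Char := fun c => if c = s[i] then '$' else c with hf
      have htakemap : (s.map f).take i = s.take i := by
        rw [← List.map_take]
        have h1 : ∀ c ∈ s.take i, f c = c := by
          intro c hc
          have hne : c ≠ s[i] := fun h => hinv c hc (h ▸ hup)
          simp [hf, hne]
        rw [List.map_congr_left h1, List.map_id']
      have hinv' : ∀ c ∈ (s.map f).take (i + 1), c ∉ pvMay := by
        rw [← List.map_take, htake, List.map_append, List.map_take, htakemap]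
        intro c hc
        rcases List.mem_append.mp hc with h | h
        · exact hinv c h
        · have : c = '$' := by simpa [hf] using h
          rw [this]; exact pv_dollar_not_may
      rw [ih (i + 1) (s.map f) (by simp; omega) hinv']
      rw [← List.map_take, htake, List.map_append, List.map_take, htakemap]
      have hdropmap : (s.map f).drop (i + 1) = (s.drop (i + 1)).map f := List.map_drop.symm
      rw [hdropmap, List.map_map]
      have : (s.drop (i + 1)).map (pvMapF ∘ f) = (s.drop (i + 1)).map pvMapF := by
        apply List.map_congr_left
        intro c _
        exact pv_mapF_comp s[i] hup c
      have hlast : List.drop i (List.map pvMapF s) = pvMapF s[i] :: List.drop (i + 1) (List.map pvMapF s) := by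
        rw [List.drop_eq_getElem_cons (by simpa using hi)]
        simp
      rw [this, hdrop, List.map_cons]
      simp [hf, hlast, pvMapF, hup]
    · rw [if_neg hup]
      have hinv' : ∀ c ∈ s.take (i + 1), c ∉ pvMay := by
        rw [htake]
        intro c hc
        rcases List.mem_append.mp hc with h | h
        · exact hinv c h
        · rw [List.mem_singleton.mp h]; exact hup
      rw [ih (i + 1) s (by omega) hinv', htake, hdrop]
      simp only [List.map_cons, List.append_assoc, List.singleton_append, pvMapF, if_neg hup]

lemma pv_mapF_eq (c : Char) : pvMapF c = if 'A' ≤ c ∧ c ≤ 'Z' then '$' else c := by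
  unfold pvMapF
  by_cases h : c ∈ pvMay
  · rw [if_pos h, if_pos]
    have := (pv_mem_may_iff c).mp h
    exact ⟨this.1, this.2⟩
  · rw [if_neg h, if_neg]
    intro ⟨h1, h2⟩
    exact h ((pv_mem_may_iff c).mpr ⟨h1, h2⟩)

-- ===== VERDICT (by name: the statement is the Claim_ definition above) =====
theorem reemplazo_spec : Claim_equal_reemplazo := by
  intro string _
  unfold Spec_reemplazo reemplazo reemplazo_alt
  rw [pv_outer_spec string.toList.length 0 string.toList (by omega) (by simp)]
  simp only [List.take_zero, List.drop_zero, List.nil_append]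
  congr 1
  apply List.map_congr_left
  intro c _
  exact pv_mapF_eq c
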